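-- pv_equiv track=rewrite | github.com/VitalBoss/Practice | sql_tree.py | priority_and
-- ===== SOURCE A (Python) =====
-- def priority_and(s): # функция, которая на верхнем уровне выражения ищет and, если есть, то возвращает true
--     close = 0
--     open = 0
--     c = False
--     for i in range(len(s)):
--         if (abs(close - open) == 0) and (s[i] == 'and'):
--             c = True
--         if s[i] == ')':
--             close += 1
--         if s[i] == '(':
--             open += 1
--     return c
-- ===== SOURCE B (Python) =====
-- def priority_and(s):
--     return any(s[:i].count('(') == s[:i].count(')')
--                for i, t in enumerate(s) if t == 'and')
-- ===== Notes on version B (the rewrite author's own statement) =====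
-- stated objective: alternative
-- what changed: Removes A's running counters and mutable flag entirely: B tests each 'and' occurrence independently by counting '(' and ')' in the prefix slice before it, trading the single stateful pass for per-occurrence prefix counting.
import Mathlib
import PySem

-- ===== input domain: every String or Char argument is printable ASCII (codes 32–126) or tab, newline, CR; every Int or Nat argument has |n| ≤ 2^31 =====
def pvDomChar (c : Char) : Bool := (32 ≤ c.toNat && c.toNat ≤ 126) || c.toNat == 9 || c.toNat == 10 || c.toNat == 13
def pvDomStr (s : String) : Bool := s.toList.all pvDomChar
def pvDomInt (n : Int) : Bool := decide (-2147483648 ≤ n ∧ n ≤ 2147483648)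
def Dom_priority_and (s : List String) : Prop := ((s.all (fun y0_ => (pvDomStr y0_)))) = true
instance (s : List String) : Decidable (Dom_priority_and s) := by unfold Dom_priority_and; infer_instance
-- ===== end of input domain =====

-- B drops A's running counters + flag: it tests each 'and' occurrence independently by counting parens in the prefix slice before it (alternative decomposition, not faster).


-- ===== PORT A =====
-- state: (close, open, c); branches in A's order, counters updated after the 'and' check
def pvStepA (st : Int × Int × Bool) (tok : String) : Int × Int × Bool :=
  let c := if (st.1 - st.2.1).natAbs = 0 ∧ tok == "and" then true else st.2.2
  let close := if tok == ")" then st.1 + 1 else st.1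
  let opn := if tok == "(" then st.2.1 + 1 else st.2.1
  (close, opn, c)

def priority_and (s : List String) : Bool :=
  (s.foldl pvStepA (0, 0, false)).2.2

-- ===== PORT B =====
-- any(s[:i].count('(') == s[:i].count(')') for i, t in enumerate(s) if t == 'and')
def priority_and_alt (s : List String) : Bool :=
  (PySem.List.enumerate s 0).any (fun p =>
    p.2 == "and" &&
      (PySem.List.count (PySem.List.slice s none (some p.1)) "(" ==
       PySem.List.count (PySem.List.slice s none (some p.1)) ")"))

-- ===== PRECONDITION & SPEC =====
def Spec_priority_and (s : List String) (out : Bool) : Prop := out = priority_and_alt s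
instance (s : List String) (out : Bool) : Decidable (Spec_priority_and s out) := by unfold Spec_priority_and; infer_instance

-- ===== CLAIM (what is proved, stated in full; the proofs are below) =====
def Claim_equal_priority_and : Prop := ∀ (s : List String), Dom_priority_and s → Spec_priority_and s (priority_and s)

-- ===== LEMMAS AND PROOFS =====
theorem pv_key (full : List String) : ∀ (s pre : List String) (c : Bool), pre ++ s = full →
    (s.foldl pvStepA ((pre.count ")" : Int), (pre.count "(" : Int), c)).2.2
      = (c || (PySem.List.enumerate s (pre.length : Int)).any (fun p =>
          p.2 == "and" &&
            (PySem.List.count (PySem.List.slice full none (some p.1)) "(" ==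
             PySem.List.count (PySem.List.slice full none (some p.1)) ")"))) := by
  intro s
  induction s with
  | nil => intro pre c _; simp [PySem.List.enumerate]
  | cons t ts ih =>
    intro pre c hfull
    have hstep : pvStepA ((pre.count ")" : Int), (pre.count "(" : Int), c) t
        = (((pre ++ [t]).count ")" : Int), ((pre ++ [t]).count "(" : Int),
           (c || (t == "and" && (pre.count "(" == pre.count ")")))) := by
      simp only [pvStepA, List.count_append]
      refine congrArg₂ Prod.mk ?_ (congrArg₂ Prod.mk ?_ ?_)
      · by_cases h : t == ")" <;> simp [h] <;> simp [beq_iff_eq] at h <;> simp [h]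
      · by_cases h : t == "(" <;> simp [h] <;> simp [beq_iff_eq] at h <;> simp [h]
      · by_cases hand : t == "and"
        · by_cases hz : pre.count "(" = pre.count ")"
          · simp [hand, hz]
          · have hne : ((pre.count ")" : Int) - (pre.count "(" : Int)).natAbs ≠ 0 := by omega
            simp [hand, hz, hne]
        · simp [hand]
    have hrest := ih (pre ++ [t]) (c || (t == "and" && (pre.count "(" == pre.count ")")))
      (by simpa using hfull)
    have htake : PySem.List.slice full none (some (pre.length : Int)) = pre := by
      rw [PySem.List.slice_to_natCast, ← hfull]
      exact List.take_left
    rw [List.foldl_cons, hstep, hrest, PySem.List.enumerate_cons, List.any_cons, htake]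
    have : ((pre ++ [t]).length : Int) = (pre.length : Int) + 1 := by simp
    rw [this]
    cases c <;> cases hand : t == "and" <;>
      simp [PySem.List.count_eq, Bool.or_comm]

-- ===== VERDICT (by name: the statement is the Claim_ definition above) =====
theorem priority_and_spec : Claim_equal_priority_and := by
  intro s _
  unfold Spec_priority_and priority_and priority_and_alt
  have := pv_key s s [] false rfl
  simpa using this
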